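-- pv_equiv track=rewrite | github.com/poig/Taylor-Foundation-Project | sem1/DSA/test1/compare-score.py | subsetA
-- ===== SOURCE A (Python) =====
-- def subsetA(arr):
--     # Write your code here
--     arr.sort(reverse=True)
--     A = []
--     sum_A = 0
--     sum_B = sum(arr)
--     for num in arr:
--         if sum_A <= sum_B:
--             A.append(num)
--             sum_A += num
--             sum_B -= num
--         else:
--             break
--     return sorted(A)
-- ===== SOURCE B (Python) =====
-- def subsetA(arr):
--     arr.sort(reverse=True)
--     total = sum(arr)
--     pref = []
--     s = 0
--     for num in arr:
--         pref.append(s)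
--         s += num
--     count = len(arr)
--     for i, p in enumerate(pref):
--         if 2 * p > total:
--             count = i
--             break
--     return sorted(arr[:count])
-- ===== Notes on version B (the rewrite author's own statement) =====
-- stated objective: alternative
-- what changed: Replaces the single greedy loop that updates two running sums (sum_A, sum_B) with a two-phase decomposition: build the prefix-sum table, locate the cutoff index as the first prefix with 2*prefix > total, and return sorted(arr[:count]).
import Mathlib
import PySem

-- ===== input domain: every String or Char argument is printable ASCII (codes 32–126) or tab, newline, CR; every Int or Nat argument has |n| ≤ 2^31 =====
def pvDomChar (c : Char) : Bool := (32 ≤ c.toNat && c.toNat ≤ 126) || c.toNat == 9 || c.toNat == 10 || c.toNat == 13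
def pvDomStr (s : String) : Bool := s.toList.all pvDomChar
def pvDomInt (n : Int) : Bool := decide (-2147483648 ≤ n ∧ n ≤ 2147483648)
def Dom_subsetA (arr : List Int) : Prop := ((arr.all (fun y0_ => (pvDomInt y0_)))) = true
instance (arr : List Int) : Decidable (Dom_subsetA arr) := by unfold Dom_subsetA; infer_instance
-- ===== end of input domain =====

-- B replaces A's single greedy loop (two running sums, break) by a prefix-sum table plus a
-- cutoff-index scan; same cost, different decomposition. Both Pythons sort `arr` in place
-- (identical side effect); the theorems here are about the return value.

-- ===== PORT A =====
-- the for-loop of A: state (A, sum_A, sum_B), break on the else branch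
def subsetALoop : List Int → List Int → Int → Int → List Int
  | [], acc, _, _ => acc
  | num :: rest, acc, sA, sB =>
      if sA ≤ sB then subsetALoop rest (acc ++ [num]) (sA + num) (sB - num)
      else acc

def subsetA (arr : List Int) : List Int :=
  let arr := PySem.List.sorted arr (fun x => x) true
  PySem.List.sorted (subsetALoop arr [] 0 arr.sum) (fun x => x) false

-- ===== PORT B =====
-- first loop of B: build the prefix-sum table (pref.append(s); s += num)
def buildPref : List Int → Int → List Int
  | [], _ => []
  | num :: rest, s => s :: buildPref rest (s + num)

-- second loop of B: scan enumerate(pref) for the first index with 2*p > total, break there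
def findCut : List (Int × Int) → Int → Int → Int
  | [], count, _ => count
  | (i, p) :: rest, count, total => if 2 * p > total then i else findCut rest count total

def subsetA_alt (arr : List Int) : List Int :=
  let arr := PySem.List.sorted arr (fun x => x) true
  let total := arr.sum
  let pref := buildPref arr 0
  let count := findCut (PySem.List.enumerate pref 0) (arr.length : Int) total
  PySem.List.sorted (PySem.List.slice arr none (some count)) (fun x => x) false

-- ===== PRECONDITION & SPEC =====
def Spec_subsetA (arr : List Int) (out : List Int) : Prop := out = subsetA_alt arr
instance (arr : List Int) (out : List Int) : Decidable (Spec_subsetA arr out) := by unfold Spec_subsetA; infer_instance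

-- ===== CLAIM (what is proved, stated in full; the proofs are below) =====
def Claim_equal_subsetA : Prop := ∀ (arr : List Int), Dom_subsetA arr → Spec_subsetA arr (subsetA arr)

-- ===== LEMMAS AND PROOFS =====

-- the number of elements A's loop takes, as a function of the start state
def cnt : List Int → Int → Int → Nat
  | [], _, _ => 0
  | num :: rest, sA, sB => if sA ≤ sB then cnt rest (sA + num) (sB - num) + 1 else 0

theorem subsetALoop_eq_take : ∀ (xs acc : List Int) (sA sB : Int),
    subsetALoop xs acc sA sB = acc ++ xs.take (cnt xs sA sB) := by
  intro xs
  induction xs with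
  | nil => intro acc sA sB; simp [subsetALoop, cnt]
  | cons num rest ih =>
      intro acc sA sB
      by_cases h : sA ≤ sB
      · simp [subsetALoop, cnt, h, ih]
      · simp [subsetALoop, cnt, h]

theorem findCut_eq_cnt : ∀ (xs : List Int) (p t j : Int),
    findCut (PySem.List.enumerate (buildPref xs p) j) (j + (xs.length : Int)) t
      = j + (cnt xs p (t - p) : Int) := by
  intro xs
  induction xs with
  | nil => intro p t j; simp [buildPref, cnt, findCut, PySem.List.enumerate_nil]
  | cons num rest ih =>
      intro p t j
      rw [buildPref, PySem.List.enumerate_cons, findCut]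
      by_cases h : 2 * p > t
      · have hc : ¬ p ≤ t - p := by omega
        simp [cnt, hc, h]
      · have hc : p ≤ t - p := by omega
        have harg : j + ((rest.length + 1 : Nat) : Int) = (j + 1) + (rest.length : Int) := by
          push_cast; ring
        simp only [List.length_cons, harg, h, if_false]
        rw [ih (p + num) t (j + 1)]
        have : t - p - num = t - (p + num) := by ring
        simp [cnt, hc, this]
        omega

theorem subsetA_spec_aux (arr : List Int) : subsetA arr = subsetA_alt arr := by
  unfold subsetA subsetA_alt
  dsimp only
  set s := PySem.List.sorted arr (fun x => x) true with hs
  have hcut := findCut_eq_cnt s 0 s.sum 0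
  simp only [zero_add, sub_zero] at hcut
  rw [hcut, subsetALoop_eq_take, List.nil_append,
      PySem.List.slice_to_natCast]

-- ===== VERDICT (by name: the statement is the Claim_ definition above) =====
theorem subsetA_spec : Claim_equal_subsetA := by
  intro arr _
  unfold Spec_subsetA
  exact subsetA_spec_aux arr
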